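-- pv_equiv track=rewrite | github.com/Taeyong98/algorithm | programmers/level_2/쿼드압축후개수세기/solution.py | solution
-- ===== SOURCE A (Python) =====
-- def solution(arr):
--     answer = []
--     n = len(arr)//2
--     dp = []
--     dp.append(arr[:])
--     while n != 0:
--         dp.append([[0 for _ in range(n)]for _ in range(n)])
--         n = n//2
--
--     zero_count = 0
--     one_count = 0
--
--     for dp_i in range(len(dp)-1):
--         n = len(dp[dp_i])
--         for i in range(0,n,2):
--             for j in range(0,n,2):
--                 if dp[dp_i][i][j] == 1 and dp[dp_i][i+1][j] == 1 and dp[dp_i][i][j+1] == 1 and dp[dp_i][i+1][j+1] == 1: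
--                     dp[dp_i+1][i//2][j//2] = 1
--                 elif dp[dp_i][i][j] == 0 and dp[dp_i][i+1][j] == 0 and dp[dp_i][i][j+1] == 0 and dp[dp_i][i+1][j+1] == 0:
--                     dp[dp_i+1][i//2][j//2] = 0
--                 else:
--                     if dp[dp_i][i][j] == 1:
--                         one_count += 1
--                     elif dp[dp_i][i][j] == 0:
--                         zero_count += 1
--
--                     if dp[dp_i][i+1][j] == 1:
--                         one_count += 1
--                     elif dp[dp_i][i+1][j] == 0:
--                         zero_count += 1
--
--                     if dp[dp_i][i][j+1] == 1:
--                         one_count += 1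
--                     elif dp[dp_i][i][j+1] == 0:
--                         zero_count += 1
--
--                     if dp[dp_i][i+1][j+1] == 1:
--                         one_count += 1
--                     elif dp[dp_i][i+1][j+1] == 0:
--                         zero_count += 1
--
--                     dp[dp_i+1][i//2][j//2] = -1
--
--     if dp[-1][0][0]==1:
--         return [0,1]
--     elif dp[-1][0][0] == 0:
--         return [1,0]
--
--     return [zero_count, one_count]
-- ===== SOURCE B (Python) =====
-- def solution(arr):
--     # Top-down divide-and-conquer over quadrants instead of A's bottom-up dp tables.
--     def compress(x, y, size):
--         # returns (value: 0/1/other or -1 for mixed, zeros counted, ones counted)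
--         if size == 1:
--             return arr[x][y], 0, 0
--         h = size // 2
--         quads = [compress(x, y, h), compress(x + h, y, h),
--                  compress(x, y + h, h), compress(x + h, y + h, h)]
--         zc = quads[0][1] + quads[1][1] + quads[2][1] + quads[3][1]
--         oc = quads[0][2] + quads[1][2] + quads[2][2] + quads[3][2]
--         vals = [q[0] for q in quads]
--         v0 = vals[0]
--         if v0 in (0, 1) and vals[1] == v0 and vals[2] == v0 and vals[3] == v0:
--             return v0, zc, oc
--         zc += sum(1 for v in vals if v == 0)
--         oc += sum(1 for v in vals if v == 1)
--         return -1, zc, oc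
--
--     v, zc, oc = compress(0, 0, len(arr))
--     if v == 1:
--         return [0, 1]
--     if v == 0:
--         return [1, 0]
--     return [zc, oc]
-- ===== Notes on version B (the rewrite author's own statement) =====
-- stated objective: alternative
-- what changed: A builds a bottom-up pyramid of mutable dp tables and merges 2x2 blocks level by level with nested index loops; B is a single top-down divide-and-conquer recursion over quadrants that returns (value-or-mixed, zero count, one count) per block and allocates no tables.
import Mathlib
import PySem

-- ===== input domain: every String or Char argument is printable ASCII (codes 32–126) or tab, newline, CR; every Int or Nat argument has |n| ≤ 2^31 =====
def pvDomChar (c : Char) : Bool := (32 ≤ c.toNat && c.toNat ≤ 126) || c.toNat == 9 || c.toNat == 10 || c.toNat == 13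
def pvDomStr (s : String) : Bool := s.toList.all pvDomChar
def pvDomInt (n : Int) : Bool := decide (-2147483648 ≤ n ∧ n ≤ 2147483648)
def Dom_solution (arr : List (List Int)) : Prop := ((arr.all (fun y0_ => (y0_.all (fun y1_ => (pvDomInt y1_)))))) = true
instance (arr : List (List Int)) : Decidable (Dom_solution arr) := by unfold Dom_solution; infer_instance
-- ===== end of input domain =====

-- B replaces A's bottom-up dp tables by a top-down divide-and-conquer recursion over quadrants
-- (different decomposition; return value equivalence, A mutates nothing observable).

-- ===== PORT A =====

-- arr[i][j] read; all reads are in range under Pre_solution (indices produced by range(0,n,2) are ≥ 0,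
-- so .toNat is exact where it is applied below)
def pvAtN (g : List (List Int)) (i j : Nat) : Int := (g.getD i []).getD j 0

-- dp[...][i][j] = v  (nested list write)
def pvSet (g : List (List Int)) (i j : Nat) (v : Int) : List (List Int) :=
  g.set i ((g.getD i []).set j v)

-- [[0 for _ in range(n)] for _ in range(n)]
def pvZeros (n : Nat) : List (List Int) :=
  (List.range n).map (fun _ => (List.range n).map (fun _ => (0 : Int)))

-- the while-loop building the zero grids: sizes n, n//2, …, 1
def pvBuild (n : Nat) : List (List (List Int)) :=
  if h : n = 0 then [] else pvZeros n :: pvBuild (n / 2)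
decreasing_by exact Nat.div_lt_self (Nat.pos_of_ne_zero h) (by norm_num)

-- the body of the innermost loop (one 2x2 block at (i, j) of cur, writing into next)
def pvBody (cur : List (List Int)) (st : List (List Int) × Int × Int) (i j : Int) :
    List (List Int) × Int × Int :=
  let next := st.1
  let zc := st.2.1
  let oc := st.2.2
  let a := pvAtN cur i.toNat j.toNat
  let b := pvAtN cur (i + 1).toNat j.toNat
  let c := pvAtN cur i.toNat (j + 1).toNat
  let d := pvAtN cur (i + 1).toNat (j + 1).toNat
  if a = 1 ∧ b = 1 ∧ c = 1 ∧ d = 1 then (pvSet next (i.toNat / 2) (j.toNat / 2) 1, zc, oc)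
  else if a = 0 ∧ b = 0 ∧ c = 0 ∧ d = 0 then (pvSet next (i.toNat / 2) (j.toNat / 2) 0, zc, oc)
  else
    (pvSet next (i.toNat / 2) (j.toNat / 2) (-1),
     zc + (if a = 0 then 1 else 0) + (if b = 0 then 1 else 0) + (if c = 0 then 1 else 0)
        + (if d = 0 then 1 else 0),
     oc + (if a = 1 then 1 else 0) + (if b = 1 then 1 else 0) + (if c = 1 then 1 else 0)
        + (if d = 1 then 1 else 0))

-- the two nested 'for i/j in range(0, n, 2)' loops for one dp level
def pvStep (cur : List (List Int)) (st : List (List Int) × Int × Int) :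
    List (List Int) × Int × Int :=
  (PySem.List.pyRange 0 (cur.length : Int) 2).foldl
    (fun st i => (PySem.List.pyRange 0 (cur.length : Int) 2).foldl
      (fun st j => pvBody cur st i j) st) st

-- 'for dp_i in range(len(dp)-1)': consecutive levels, threading the counters
def pvLevels : List (List (List Int)) → Int → Int → (List (List Int)) × Int × Int
  | [], zc, oc => ([], zc, oc)
  | [g], zc, oc => (g, zc, oc)
  | cur :: next :: rest, zc, oc =>
    let r := pvStep cur (next, zc, oc)
    pvLevels (r.1 :: rest) r.2.1 r.2.2
termination_by dp => dp.length

def solution (arr : List (List Int)) : List Int :=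
  let dp := arr :: pvBuild (arr.length / 2)
  let r := pvLevels dp 0 0
  if pvAtN r.1 0 0 = 1 then [0, 1]
  else if pvAtN r.1 0 0 = 0 then [1, 0]
  else [r.2.1, r.2.2]

-- ===== PORT B =====

-- compress(x, y, size) -> (value or -1 for mixed, zeros counted, ones counted)
-- size = 0 never occurs under Pre_solution; the 'size ≤ 1' guard only makes the recursion total there
def pvCompress (arr : List (List Int)) (x y size : Nat) : Int × Int × Int :=
  if size ≤ 1 then (pvAtN arr x y, 0, 0)
  else
    let h := size / 2
    let q1 := pvCompress arr x y h
    let q2 := pvCompress arr (x + h) y h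
    let q3 := pvCompress arr x (y + h) h
    let q4 := pvCompress arr (x + h) (y + h) h
    let zc := q1.2.1 + q2.2.1 + q3.2.1 + q4.2.1
    let oc := q1.2.2 + q2.2.2 + q3.2.2 + q4.2.2
    if (q1.1 = 0 ∨ q1.1 = 1) ∧ q2.1 = q1.1 ∧ q3.1 = q1.1 ∧ q4.1 = q1.1 then (q1.1, zc, oc)
    else
      (-1,
       zc + (if q1.1 = 0 then 1 else 0) + (if q2.1 = 0 then 1 else 0)
          + (if q3.1 = 0 then 1 else 0) + (if q4.1 = 0 then 1 else 0),
       oc + (if q1.1 = 1 then 1 else 0) + (if q2.1 = 1 then 1 else 0)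
          + (if q3.1 = 1 then 1 else 0) + (if q4.1 = 1 then 1 else 0))
termination_by size
decreasing_by all_goals omega

def solution_alt (arr : List (List Int)) : List Int :=
  let r := pvCompress arr 0 0 arr.length
  if r.1 = 1 then [0, 1]
  else if r.1 = 0 then [1, 0]
  else [r.2.1, r.2.2]

-- ===== PRECONDITION & SPEC =====
-- Pre_solution holds exactly where the Python A returns: the side must be a power of two (otherwise a
-- level of odd size > 1 is reached and dp[..][i+1] raises IndexError; an empty arr raises on dp[-1][0][0])
-- and every row must have at least len(arr) entries (level 0 reads dp[0][i][j] for all i, j < len(arr)).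
def Pre_solution (arr : List (List Int)) : Prop :=
  (∃ k : Fin (arr.length + 1), arr.length = 2 ^ (k : Nat)) ∧ ∀ row ∈ arr, arr.length ≤ row.length
instance (arr : List (List Int)) : Decidable (Pre_solution arr) := by unfold Pre_solution; infer_instance

def pvWitness_solution : List (List Int) := [[1, 0], [0, 0]]

def Spec_solution (arr : List (List Int)) (out : List Int) : Prop := out = solution_alt arr
instance (arr : List (List Int)) (out : List Int) : Decidable (Spec_solution arr out) := by unfold Spec_solution; infer_instance

-- ===== CLAIM (what is proved, stated in full; the proofs are below) =====
def Claim_equal_solution : Prop := ∀ (arr : List (List Int)), Dom_solution arr → Pre_solution arr → Spec_solution arr (solution arr)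

-- ===== LEMMAS AND PROOFS =====

lemma foldl_set_list {α : Type} (g : Nat → α) :
    ∀ (m : Nat) (l : List α), m ≤ l.length →
    (List.range m).foldl (fun l t => l.set t (g t)) l = (List.range m).map g ++ l.drop m := by
  intro m
  induction m with
  | zero => intro l _; simp
  | succ m ih =>
    intro l hm
    rw [List.range_succ, List.foldl_append, List.foldl_cons, List.foldl_nil,
      ih l (by omega), List.set_append]
    rw [if_neg (by simp)]
    simp only [List.length_map, List.length_range, Nat.sub_self]
    rw [List.drop_eq_getElem_cons (by omega), List.set_cons_zero]
    simp

lemma inner_to_row (f z o : Nat → Int) :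
    ∀ (m : Nat) (next : List (List Int)) (r : Nat) (zc oc : Int), r < next.length →
    (List.range m).foldl (fun st t => (pvSet st.1 r t (f t), st.2.1 + z t, st.2.2 + o t)) (next, zc, oc)
      = (next.set r ((List.range m).foldl (fun row t => row.set t (f t)) (next.getD r [])),
         zc + ((List.range m).map z).sum, oc + ((List.range m).map o).sum) := by
  intro m
  induction m with
  | zero =>
    intro next r zc oc hr
    simp only [List.range_zero, List.foldl_nil, List.map_nil, List.sum_nil, add_zero]
    rw [List.getD_eq_getElem?_getD, List.getElem?_eq_getElem hr]
    simp [List.set_getElem_self hr]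
  | succ m ih =>
    intro next r zc oc hr
    rw [List.range_succ, List.foldl_append, List.foldl_cons, List.foldl_nil, ih next r zc oc hr]
    simp only [pvSet]
    rw [List.getD_eq_getElem?_getD (l := next.set r _), List.getElem?_set_self (by simpa using hr)]
    simp only [Option.getD_some, List.set_set]
    simp [List.foldl_append, add_assoc]

def mergeF (a b c d : Int) : Int :=
  if a = 1 ∧ b = 1 ∧ c = 1 ∧ d = 1 then 1
  else if a = 0 ∧ b = 0 ∧ c = 0 ∧ d = 0 then 0
  else -1

def mCell (g : List (List Int)) (i j : Nat) : Int :=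
  mergeF (pvAtN g (2 * i) (2 * j)) (pvAtN g (2 * i + 1) (2 * j))
         (pvAtN g (2 * i) (2 * j + 1)) (pvAtN g (2 * i + 1) (2 * j + 1))

def zCell (g : List (List Int)) (i j : Nat) : Int :=
  if mCell g i j = -1 then
    (if pvAtN g (2 * i) (2 * j) = 0 then 1 else 0) + (if pvAtN g (2 * i + 1) (2 * j) = 0 then 1 else 0)
    + (if pvAtN g (2 * i) (2 * j + 1) = 0 then 1 else 0)
    + (if pvAtN g (2 * i + 1) (2 * j + 1) = 0 then 1 else 0)
  else 0

def oCell (g : List (List Int)) (i j : Nat) : Int :=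
  if mCell g i j = -1 then
    (if pvAtN g (2 * i) (2 * j) = 1 then 1 else 0) + (if pvAtN g (2 * i + 1) (2 * j) = 1 then 1 else 0)
    + (if pvAtN g (2 * i) (2 * j + 1) = 1 then 1 else 0)
    + (if pvAtN g (2 * i + 1) (2 * j + 1) = 1 then 1 else 0)
  else 0

lemma body_eq (cur next : List (List Int)) (zc oc : Int) (r t : Nat) :
    pvBody cur (next, zc, oc) (2 * (r : Int)) (2 * (t : Int))
      = (pvSet next r t (mCell cur r t), zc + zCell cur r t, oc + oCell cur r t) := by
  have h1 : (2 * (r : Int)).toNat = 2 * r := by omega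
  have h2 : (2 * (r : Int) + 1).toNat = 2 * r + 1 := by omega
  have h3 : (2 * (t : Int)).toNat = 2 * t := by omega
  have h4 : (2 * (t : Int) + 1).toNat = 2 * t + 1 := by omega
  have h5 : 2 * r / 2 = r := by omega
  have h6 : 2 * t / 2 = t := by omega
  simp only [pvBody, h1, h2, h3, h4, h5, h6, mCell, mergeF, zCell, oCell]
  by_cases ha : pvAtN cur (2*r) (2*t) = 1 ∧ pvAtN cur (2*r+1) (2*t) = 1 ∧ pvAtN cur (2*r) (2*t+1) = 1 ∧ pvAtN cur (2*r+1) (2*t+1) = 1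
  · simp [ha]
  · by_cases hb : pvAtN cur (2*r) (2*t) = 0 ∧ pvAtN cur (2*r+1) (2*t) = 0 ∧ pvAtN cur (2*r) (2*t+1) = 0 ∧ pvAtN cur (2*r+1) (2*t+1) = 0
    · simp [hb]
    · simp only [if_neg ha, if_neg hb]
      norm_num [add_assoc]

lemma outer_fold (cur : List (List Int)) (m : Nat) :
    ∀ (mp : Nat), mp ≤ m → ∀ (next : List (List Int)) (zc oc : Int), next.length = m →
    (∀ row ∈ next, row.length = m) →
    (List.range mp).foldl
      (fun st r => (List.range m).foldl
        (fun st t => (pvSet st.1 r t (mCell cur r t), st.2.1 + zCell cur r t, st.2.2 + oCell cur r t)) st)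
      (next, zc, oc)
    = ((List.range mp).map (fun r => (List.range m).map (fun t => mCell cur r t)) ++ next.drop mp,
       zc + ((List.range mp).map (fun r => ((List.range m).map (fun t => zCell cur r t)).sum)).sum,
       oc + ((List.range mp).map (fun r => ((List.range m).map (fun t => oCell cur r t)).sum)).sum) := by
  intro mp
  induction mp with
  | zero => intro _ next zc oc _ _; simp
  | succ mp ih =>
    intro hmp next zc oc hlen hrows
    rw [List.range_succ, List.foldl_append, List.foldl_cons, List.foldl_nil,
      ih (by omega) next zc oc hlen hrows]
    set P := (List.range mp).map (fun r => (List.range m).map (fun t => mCell cur r t)) with hP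
    have hPlen : P.length = mp := by simp [hP]
    have hSlen : (P ++ next.drop mp).length = m := by simp [hPlen, hlen]; omega
    have hmpS : mp < (P ++ next.drop mp).length := by omega
    rw [inner_to_row _ _ _ m (P ++ next.drop mp) mp _ _ hmpS]
    have hrow : (P ++ next.drop mp).getD mp [] = next.getD mp [] := by
      rw [List.getD_eq_getElem?_getD, List.getD_eq_getElem?_getD, List.getElem?_append_right (by omega),
        hPlen, Nat.sub_self, List.getElem?_drop, Nat.add_zero]
    have hmem : next.getD mp [] ∈ next := by
      rw [List.getD_eq_getElem?_getD, List.getElem?_eq_getElem (by omega)]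
      exact List.getElem_mem _
    have hrlen : (next.getD mp []).length = m := hrows _ hmem
    rw [hrow, foldl_set_list _ m _ (by omega)]
    have hdropnil : (next.getD mp []).drop m = [] := by rw [← hrlen]; exact List.drop_length
    rw [hdropnil, List.append_nil]
    rw [List.set_append, if_neg (by omega), hPlen, Nat.sub_self]
    rw [List.drop_eq_getElem_cons (by omega), List.set_cons_zero]
    refine congrArg₂ _ ?_ (congrArg₂ _ ?_ ?_) <;>
      simp [hP, add_assoc]

def pvMerge (g : List (List Int)) : List (List Int) :=
  (List.range (g.length / 2)).map (fun i => (List.range (g.length / 2)).map (fun j => mCell g i j))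

def sumZ (g : List (List Int)) (x y m : Nat) : Int :=
  ((List.range m).map (fun di => ((List.range m).map (fun dj => zCell g (x + di) (y + dj))).sum)).sum

def sumO (g : List (List Int)) (x y m : Nat) : Int :=
  ((List.range m).map (fun di => ((List.range m).map (fun dj => oCell g (x + di) (y + dj))).sum)).sum

lemma pyRange_two (m : Nat) :
    PySem.List.pyRange 0 (2 * m : Nat) 2 = (List.range m).map (fun t : Nat => 2 * (t : Int)) := by
  rw [PySem.List.pyRange_of_pos _ _ (by norm_num)]
  rcases Nat.eq_zero_or_pos m with h | h
  · subst h; simp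
  · have hlt : (0 : Int) < (2 * m : Nat) := by push_cast; omega
    rw [if_pos hlt]
    have h2 : (((2 * m : Nat) : Int) - 0 + 2 - 1) / 2 = (m : Int) := by push_cast; omega
    rw [h2, Int.toNat_natCast]
    simp only [zero_add]

lemma step_eq (cur : List (List Int)) (zc oc : Int) (m : Nat) (hm : cur.length = 2 * m) :
    pvStep cur (pvZeros m, zc, oc) = (pvMerge cur, zc + sumZ cur 0 0 m, oc + sumO cur 0 0 m) := by
  unfold pvStep
  rw [hm, pyRange_two, List.foldl_map]
  have hbody : (fun (st : List (List Int) × Int × Int) (r : Nat) =>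
        ((List.range m).map (fun t : Nat => 2 * (t : Int))).foldl
          (fun st j => pvBody cur st (2 * (r : Int)) j) st)
      = fun st r => (List.range m).foldl
          (fun st t => (pvSet st.1 r t (mCell cur r t), st.2.1 + zCell cur r t, st.2.2 + oCell cur r t)) st := by
    funext st r
    rw [List.foldl_map]
    congr 1
    funext st t
    obtain ⟨n, z, o⟩ := st
    exact body_eq cur n z o r t
  rw [hbody]
  rw [outer_fold cur m m le_rfl _ zc oc (by simp [pvZeros]) (by intro row hrow; simp [pvZeros] at hrow; simp [hrow])]
  have hdrop : (pvZeros m).drop m = [] := by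
    apply List.drop_eq_nil_of_le; simp [pvZeros]
  rw [hdrop, List.append_nil]
  have hm2 : cur.length / 2 = m := by omega
  simp [pvMerge, sumZ, sumO, hm2]

lemma sumZ_one (g : List (List Int)) (x y : Nat) : sumZ g x y 1 = zCell g x y := by
  simp [sumZ]

lemma sumO_one (g : List (List Int)) (x y : Nat) : sumO g x y 1 = oCell g x y := by
  simp [sumO]

lemma sum_split (f : Nat → Int) (m : Nat) :
    ((List.range (m + m)).map f).sum = ((List.range m).map f).sum + ((List.range m).map (fun i => f (m + i))).sum := by
  rw [List.range_add, List.map_append, List.sum_append, List.map_map]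
  rfl

lemma sumZ_split (g : List (List Int)) (x y m : Nat) :
    sumZ g x y (m + m) = sumZ g x y m + sumZ g (x + m) y m + sumZ g x (y + m) m + sumZ g (x + m) (y + m) m := by
  unfold sumZ
  rw [sum_split]
  have hrow : ∀ a b : Nat, ((List.range (m + m)).map (fun dj => zCell g a (b + dj))).sum
      = ((List.range m).map (fun dj => zCell g a (b + dj))).sum + ((List.range m).map (fun dj => zCell g a (b + m + dj))).sum := by
    intro a b
    rw [sum_split]
    congr 1
    refine congrArg List.sum (List.map_congr_left ?_)
    intro dj _
    congr 1
    omega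
  have h1 : ((List.range m).map (fun di => ((List.range (m+m)).map (fun dj => zCell g (x + di) (y + dj))).sum)).sum
      = ((List.range m).map (fun di => ((List.range m).map (fun dj => zCell g (x + di) (y + dj))).sum)).sum
        + ((List.range m).map (fun di => ((List.range m).map (fun dj => zCell g (x + di) (y + m + dj))).sum)).sum := by
    rw [← PySem.List.sum_map_add_int]
    refine congrArg List.sum (List.map_congr_left ?_)
    intro di _
    exact hrow _ _
  have h2 : ((List.range m).map (fun i => ((List.range (m+m)).map (fun dj => zCell g (x + (m + i)) (y + dj))).sum)).sum
      = ((List.range m).map (fun di => ((List.range m).map (fun dj => zCell g (x + m + di) (y + dj))).sum)).sum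
        + ((List.range m).map (fun di => ((List.range m).map (fun dj => zCell g (x + m + di) (y + m + dj))).sum)).sum := by
    rw [← PySem.List.sum_map_add_int]
    refine congrArg List.sum (List.map_congr_left ?_)
    intro di _
    rw [show x + (m + di) = x + m + di by omega]
    exact hrow _ _
  rw [h1, h2]
  ring

lemma sumO_split (g : List (List Int)) (x y m : Nat) :
    sumO g x y (m + m) = sumO g x y m + sumO g (x + m) y m + sumO g x (y + m) m + sumO g (x + m) (y + m) m := by
  unfold sumO
  rw [sum_split]
  have hrow : ∀ a b : Nat, ((List.range (m + m)).map (fun dj => oCell g a (b + dj))).sum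
      = ((List.range m).map (fun dj => oCell g a (b + dj))).sum + ((List.range m).map (fun dj => oCell g a (b + m + dj))).sum := by
    intro a b
    rw [sum_split]
    congr 1
    refine congrArg List.sum (List.map_congr_left ?_)
    intro dj _
    congr 1
    omega
  have h1 : ((List.range m).map (fun di => ((List.range (m+m)).map (fun dj => oCell g (x + di) (y + dj))).sum)).sum
      = ((List.range m).map (fun di => ((List.range m).map (fun dj => oCell g (x + di) (y + dj))).sum)).sum
        + ((List.range m).map (fun di => ((List.range m).map (fun dj => oCell g (x + di) (y + m + dj))).sum)).sum := by
    rw [← PySem.List.sum_map_add_int]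
    refine congrArg List.sum (List.map_congr_left ?_)
    intro di _
    exact hrow _ _
  have h2 : ((List.range m).map (fun i => ((List.range (m+m)).map (fun dj => oCell g (x + (m + i)) (y + dj))).sum)).sum
      = ((List.range m).map (fun di => ((List.range m).map (fun dj => oCell g (x + m + di) (y + dj))).sum)).sum
        + ((List.range m).map (fun di => ((List.range m).map (fun dj => oCell g (x + m + di) (y + m + dj))).sum)).sum := by
    rw [← PySem.List.sum_map_add_int]
    refine congrArg List.sum (List.map_congr_left ?_)
    intro di _
    rw [show x + (m + di) = x + m + di by omega]
    exact hrow _ _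
  rw [h1, h2]
  ring

lemma compress_one (arr : List (List Int)) (x y : Nat) :
    pvCompress arr x y 1 = (pvAtN arr x y, 0, 0) := by
  rw [pvCompress]; simp

lemma compress_step (arr : List (List Int)) (x y size : Nat) (hs : 1 < size) :
    pvCompress arr x y size =
      (let h := size / 2
       let q1 := pvCompress arr x y h
       let q2 := pvCompress arr (x + h) y h
       let q3 := pvCompress arr x (y + h) h
       let q4 := pvCompress arr (x + h) (y + h) h
       let zc := q1.2.1 + q2.2.1 + q3.2.1 + q4.2.1
       let oc := q1.2.2 + q2.2.2 + q3.2.2 + q4.2.2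
       if (q1.1 = 0 ∨ q1.1 = 1) ∧ q2.1 = q1.1 ∧ q3.1 = q1.1 ∧ q4.1 = q1.1 then (q1.1, zc, oc)
       else
         (-1,
          zc + (if q1.1 = 0 then 1 else 0) + (if q2.1 = 0 then 1 else 0)
             + (if q3.1 = 0 then 1 else 0) + (if q4.1 = 0 then 1 else 0),
          oc + (if q1.1 = 1 then 1 else 0) + (if q2.1 = 1 then 1 else 0)
             + (if q3.1 = 1 then 1 else 0) + (if q4.1 = 1 then 1 else 0))) := by
  rw [pvCompress, if_neg (by omega)]

lemma at_merge (g : List (List Int)) (i j : Nat) (hi : i < g.length / 2) (hj : j < g.length / 2) :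
    pvAtN (pvMerge g) i j = mCell g i j := by
  simp [pvAtN, pvMerge, List.getD_eq_getElem?_getD, hi, hj]

lemma compress_merge (g : List (List Int)) (hg : 2 ∣ g.length) :
    ∀ (k : Nat) (x y : Nat), 2 ∣ x → 2 ∣ y → x + 2 ^ (k + 1) ≤ g.length → y + 2 ^ (k + 1) ≤ g.length →
    pvCompress g x y (2 ^ (k + 1)) =
      ((pvCompress (pvMerge g) (x / 2) (y / 2) (2 ^ k)).1,
       (pvCompress (pvMerge g) (x / 2) (y / 2) (2 ^ k)).2.1 + sumZ g (x / 2) (y / 2) (2 ^ k),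
       (pvCompress (pvMerge g) (x / 2) (y / 2) (2 ^ k)).2.2 + sumO g (x / 2) (y / 2) (2 ^ k)) := by
  intro k
  induction k with
  | zero =>
    intro x y hx hy hxr hyr
    rw [show (2:Nat) ^ (0 + 1) = 2 by norm_num] at hxr hyr ⊢
    rw [pow_zero]
    have hx2 : 2 * (x / 2) = x := by omega
    have hy2 : 2 * (y / 2) = y := by omega
    have hxlt : x / 2 < g.length / 2 := by omega
    have hylt : y / 2 < g.length / 2 := by omega
    rw [compress_step g x y 2 (by norm_num)]
    rw [show (2:Nat) / 2 = 1 by norm_num]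
    simp only [compress_one, sumZ_one, sumO_one, at_merge g _ _ hxlt hylt]
    simp only [mCell, zCell, oCell, mergeF, hx2, hy2]
    by_cases h1 : pvAtN g x y = 1 ∧ pvAtN g (x+1) y = 1 ∧ pvAtN g x (y+1) = 1 ∧ pvAtN g (x+1) (y+1) = 1
    · obtain ⟨e1, e2, e3, e4⟩ := h1
      simp [e1, e2, e3, e4]
    · by_cases h0 : pvAtN g x y = 0 ∧ pvAtN g (x+1) y = 0 ∧ pvAtN g x (y+1) = 0 ∧ pvAtN g (x+1) (y+1) = 0
      · obtain ⟨e1, e2, e3, e4⟩ := h0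
        simp [e1, e2, e3, e4]
      · have hc : ¬ ((pvAtN g x y = 0 ∨ pvAtN g x y = 1) ∧ pvAtN g (x+1) y = pvAtN g x y
            ∧ pvAtN g x (y+1) = pvAtN g x y ∧ pvAtN g (x+1) (y+1) = pvAtN g x y) := by
          rintro ⟨h01, hb, hc', hd⟩
          rcases h01 with h | h <;> [exact h0 ⟨h, by omega, by omega, by omega⟩;
            exact h1 ⟨h, by omega, by omega, by omega⟩]
        simp only [if_neg hc, if_neg h1, if_neg h0]
        norm_num [add_assoc]
  | succ k ih =>
    intro x y hx hy hxr hyr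
    have hp1 : (2:Nat) ^ (k + 1) = 2 * 2 ^ k := by rw [pow_succ]; ring
    have hp2 : (2:Nat) ^ (k + 1 + 1) = 4 * 2 ^ k := by rw [pow_succ, pow_succ]; ring
    have hppos : 0 < (2:Nat) ^ k := Nat.two_pow_pos k
    have hc1 : (x + 2 ^ (k + 1)) / 2 = x / 2 + 2 ^ k := by omega
    have hc2 : (y + 2 ^ (k + 1)) / 2 = y / 2 + 2 ^ k := by omega
    have hdiv : (2:Nat) ^ (k + 1 + 1) / 2 = 2 ^ (k + 1) := by omega
    have hdiv' : (2:Nat) ^ (k + 1) / 2 = 2 ^ k := by omega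
    have e1 := ih x y hx hy (by omega) (by omega)
    have e2 := ih (x + 2 ^ (k + 1)) y (by omega) hy (by omega) (by omega)
    have e3 := ih x (y + 2 ^ (k + 1)) hx (by omega) (by omega) (by omega)
    have e4 := ih (x + 2 ^ (k + 1)) (y + 2 ^ (k + 1)) (by omega) (by omega) (by omega) (by omega)
    rw [hc1] at e2 e4
    rw [hc2] at e3 e4
    rw [compress_step g x y (2 ^ (k + 1 + 1)) (by omega)]
    rw [compress_step (pvMerge g) (x / 2) (y / 2) (2 ^ (k + 1)) (by omega)]
    simp only [hdiv, hdiv', e1, e2, e3, e4]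
    rw [show (2:Nat) ^ (k+1) = 2 ^ k + 2 ^ k by omega, sumZ_split, sumO_split]
    by_cases hcond : ((pvCompress (pvMerge g) (x / 2) (y / 2) (2 ^ k)).1 = 0 ∨
        (pvCompress (pvMerge g) (x / 2) (y / 2) (2 ^ k)).1 = 1) ∧
        (pvCompress (pvMerge g) (x / 2 + 2 ^ k) (y / 2) (2 ^ k)).1 = (pvCompress (pvMerge g) (x / 2) (y / 2) (2 ^ k)).1 ∧
        (pvCompress (pvMerge g) (x / 2) (y / 2 + 2 ^ k) (2 ^ k)).1 = (pvCompress (pvMerge g) (x / 2) (y / 2) (2 ^ k)).1 ∧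
        (pvCompress (pvMerge g) (x / 2 + 2 ^ k) (y / 2 + 2 ^ k) (2 ^ k)).1 = (pvCompress (pvMerge g) (x / 2) (y / 2) (2 ^ k)).1
    · simp only [if_pos hcond, Prod.mk.injEq]
      exact ⟨trivial, by ring, by ring⟩
    · simp only [if_neg hcond, Prod.mk.injEq]
      exact ⟨trivial, by ring, by ring⟩

lemma levels_cons (cur next : List (List Int)) (rest : List (List (List Int))) (zc oc : Int) :
    pvLevels (cur :: next :: rest) zc oc =
      pvLevels ((pvStep cur (next, zc, oc)).1 :: rest)
        (pvStep cur (next, zc, oc)).2.1 (pvStep cur (next, zc, oc)).2.2 := by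
  rw [pvLevels]

lemma chain (k : Nat) : ∀ (g : List (List Int)), g.length = 2 ^ k → ∀ (zc oc : Int),
    ∃ G, pvLevels (g :: pvBuild (2 ^ k / 2)) zc oc
        = (G, zc + (pvCompress g 0 0 (2 ^ k)).2.1, oc + (pvCompress g 0 0 (2 ^ k)).2.2)
      ∧ pvAtN G 0 0 = (pvCompress g 0 0 (2 ^ k)).1 := by
  induction k with
  | zero =>
    intro g _ zc oc
    refine ⟨g, ?_, ?_⟩
    · rw [show (2:Nat) ^ 0 / 2 = 0 by norm_num, pvBuild]
      simp [pvLevels, pow_zero, compress_one]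
    · simp [pow_zero, compress_one]
  | succ k ih =>
    intro g hlen zc oc
    have hppos : 0 < (2:Nat) ^ k := Nat.two_pow_pos k
    have hlen2 : g.length = 2 * 2 ^ k := by rw [hlen, pow_succ]; ring
    have hdiv : (2:Nat) ^ (k + 1) / 2 = 2 ^ k := by omega
    have hmlen : (pvMerge g).length = 2 ^ k := by simp [pvMerge]; omega
    obtain ⟨G, hG, hat⟩ := ih (pvMerge g) hmlen (zc + sumZ g 0 0 (2 ^ k)) (oc + sumO g 0 0 (2 ^ k))
    have hcm := compress_merge g (by omega) k 0 0 ⟨0, rfl⟩ ⟨0, rfl⟩ (by omega) (by omega)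
    rw [Nat.zero_div] at hcm
    refine ⟨G, ?_, ?_⟩
    · rw [hdiv, pvBuild, dif_neg (by omega), levels_cons, step_eq g zc oc (2 ^ k) hlen2]
      simp only []
      rw [hG, hcm]
      refine congrArg₂ _ rfl (congrArg₂ _ ?_ ?_) <;> ring
    · rw [hat, hcm]

-- ===== VERDICT (by name: the statement is the Claim_ definition above) =====
theorem solution_spec : Claim_equal_solution := by
  intro arr _ hpre
  obtain ⟨⟨k, hk⟩, -⟩ := hpre
  obtain ⟨G, hG, hat⟩ := chain k arr hk 0 0
  unfold Spec_solution solution solution_alt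
  rw [hk]
  simp only [hG, hat, zero_add]
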